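-- pv_equiv track=rewrite | github.com/gabrielbianchin/bacharelado | TCC/ferramentaweb/ferramenta/codigo.py | prenilacao
-- ===== SOURCE A (Python) =====
-- def prenilacao(sequence):
-- 	inicio = 0
-- 	fim = 4
-- 	resposta = 0
-- 	while fim <= len(sequence):
-- 		if sequence[inicio] == 'C' and (sequence[inicio+1] == 'I' or sequence[inicio+1] == 'V' or sequence[inicio+1] == 'L' or sequence[inicio+1] == 'A' or sequence[inicio+1] == 'P' or sequence[inicio+1] == 'M') and (sequence[inicio+2] == 'I' or sequence[inicio+2] == 'V' or sequence[inicio+2] == 'L' or sequence[inicio+2] == 'A' or sequence[inicio+2] == 'P' or sequence[inicio+2] == 'M') and (sequence[inicio+3] == 'A' or sequence[inicio+3] == 'M' or sequence[inicio+3] == 'S' or sequence[inicio+3] == 'L'):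
-- 			resposta = 1
-- 		inicio += 1
-- 		fim += 1
-- 	return resposta
-- ===== SOURCE B (Python) =====
-- def prenilacao(sequence):
--     # KMP-style automaton for the pattern C [IVLAPM] [IVLAPM] [AMSL]:
--     # state = length of the longest suffix of the text read so far that is a
--     # viable pattern prefix; accept (return 1) as soon as state would reach 4.
--     state = 0
--     for ch in sequence:
--         if state == 3 and ch in 'AMSL':
--             return 1
--         if state in (1, 2) and ch in 'IVLAPM':
--             state += 1
--         elif ch == 'C':
--             state = 1
--         else:
--             state = 0
--     return 0
-- ===== Notes on version B (the rewrite author's own statement) =====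
-- stated objective: alternative
-- what changed: Replaces A's 4-character sliding-window rescan with a KMP-style finite automaton: one left-to-right pass keeping a match-progress state (0-3) with failure transitions, returning 1 as soon as the accepting state is reached.
import Mathlib
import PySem

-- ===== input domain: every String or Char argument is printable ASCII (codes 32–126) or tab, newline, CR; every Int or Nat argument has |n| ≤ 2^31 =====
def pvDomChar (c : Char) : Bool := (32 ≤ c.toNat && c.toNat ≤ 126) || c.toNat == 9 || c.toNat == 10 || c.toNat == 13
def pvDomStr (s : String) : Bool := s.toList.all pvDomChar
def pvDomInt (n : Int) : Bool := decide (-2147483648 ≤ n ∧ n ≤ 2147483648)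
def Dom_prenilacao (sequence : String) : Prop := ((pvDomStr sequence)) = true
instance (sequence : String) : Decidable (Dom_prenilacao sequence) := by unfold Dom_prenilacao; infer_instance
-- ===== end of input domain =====

-- B replaces A's sliding-window scan with a KMP-style automaton: one pass with a match-progress state (same O(n); a timing run measured a constant-factor speedup).

-- ===== PORT A =====
-- A's window test at position `inicio`; all four indices are in range whenever the
-- loop body runs (fim = inicio+4 ≤ len), so `getD` is exact for Python's `sequence[i]`.
def pvWinA (t : List Char) (inicio : Nat) : Bool :=
  (t.getD inicio ' ' == 'C') &&
  (t.getD (inicio+1) ' ' == 'I' || t.getD (inicio+1) ' ' == 'V' || t.getD (inicio+1) ' ' == 'L' ||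
   t.getD (inicio+1) ' ' == 'A' || t.getD (inicio+1) ' ' == 'P' || t.getD (inicio+1) ' ' == 'M') &&
  (t.getD (inicio+2) ' ' == 'I' || t.getD (inicio+2) ' ' == 'V' || t.getD (inicio+2) ' ' == 'L' ||
   t.getD (inicio+2) ' ' == 'A' || t.getD (inicio+2) ' ' == 'P' || t.getD (inicio+2) ' ' == 'M') &&
  (t.getD (inicio+3) ' ' == 'A' || t.getD (inicio+3) ' ' == 'M' || t.getD (inicio+3) ' ' == 'S' ||
   t.getD (inicio+3) ' ' == 'L')

-- the `while fim <= len(sequence)` loop with state (inicio, fim, resposta)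
def pvLoopA (t : List Char) (inicio fim : Nat) (resposta : Int) : Int :=
  if h : fim ≤ t.length then
    pvLoopA t (inicio+1) (fim+1) (if pvWinA t inicio then 1 else resposta)
  else resposta
termination_by t.length + 1 - fim

def prenilacao (sequence : String) : Int :=
  pvLoopA sequence.toList 0 4 0

-- ===== PORT B =====
-- the automaton loop of Source B: state 0..3 over the remaining characters
def pvAuto : List Char → Nat → Int
  | [], _ => 0
  | ch :: rest, st =>
    if st == 3 && "AMSL".toList.contains ch then 1
    else pvAuto rest
      (if (st == 1 || st == 2) && "IVLAPM".toList.contains ch then st + 1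
       else if ch == 'C' then 1 else 0)

def prenilacao_alt (sequence : String) : Int :=
  pvAuto sequence.toList 0

-- ===== PRECONDITION & SPEC =====
def Spec_prenilacao (sequence : String) (out : Int) : Prop := out = prenilacao_alt sequence
instance (sequence : String) (out : Int) : Decidable (Spec_prenilacao sequence out) := by unfold Spec_prenilacao; infer_instance

-- ===== CLAIM (what is proved, stated in full; the proofs are below) =====
def Claim_equal_prenilacao : Prop := ∀ (sequence : String), Dom_prenilacao sequence → Spec_prenilacao sequence (prenilacao sequence)

-- ===== LEMMAS AND PROOFS =====

-- window test on the first four characters of a list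
def pvWin? : List Char → Bool
  | a :: b :: c :: d :: _ =>
      a == 'C' && "IVLAPM".toList.contains b && "IVLAPM".toList.contains c &&
      "AMSL".toList.contains d
  | _ => false

-- structural scan: some length-4 window matches
def pvScan4 : List Char → Bool
  | a :: b :: c :: d :: rest => pvWin? (a :: b :: c :: d :: rest) || pvScan4 (b :: c :: d :: rest)
  | _ => false

theorem pvScan4_cons (a : Char) (t : List Char) :
    pvScan4 (a :: t) = (pvWin? (a :: t) || pvScan4 t) := by
  match t with
  | [] => rfl
  | [_] => rfl
  | [_, _] => rfl
  | _ :: _ :: _ :: _ => rfl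

theorem pvWin?_not_C (a : Char) (t : List Char) (h : (a == 'C') = false) :
    pvWin? (a :: t) = false := by
  match t with
  | [] => rfl
  | [_] => rfl
  | [_, _] => rfl
  | _ :: _ :: _ :: _ => simp only [pvWin?]; rw [h]; simp

theorem pvWin?_snd (a b : Char) (t : List Char) (h : "IVLAPM".toList.contains b = false) :
    pvWin? (a :: b :: t) = false := by
  match t with
  | [] => rfl
  | [_] => rfl
  | _ :: _ :: _ => simp only [pvWin?]; rw [h]; simp

theorem pvWin?_thd (a b c : Char) (t : List Char) (h : "IVLAPM".toList.contains c = false) :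
    pvWin? (a :: b :: c :: t) = false := by
  match t with
  | [] => rfl
  | _ :: _ =>
      simp only [pvWin?]
      rw [h]; simp

theorem pvWin?_snd_congr (a b : Char) (t : List Char) (h : "IVLAPM".toList.contains b = true) :
    pvWin? (a :: b :: t) = pvWin? (a :: 'I' :: t) := by
  match t with
  | [] => rfl
  | [_] => rfl
  | _ :: _ :: _ =>
      simp only [pvWin?]
      rw [h, show ("IVLAPM".toList.contains 'I') = true from by decide]

theorem pvWin?_thd_congr (a b c : Char) (t : List Char) (h : "IVLAPM".toList.contains c = true) :
    pvWin? (a :: b :: c :: t) = pvWin? (a :: b :: 'I' :: t) := by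
  match t with
  | [] => rfl
  | _ :: _ =>
      simp only [pvWin?]
      rw [h, show ("IVLAPM".toList.contains 'I') = true from by decide]

-- ===== A-side: the while loop computes pvScan4 =====
theorem pvLoopA_cons (t : List Char) (c : Char) (inicio fim : Nat) (r : Int) :
    pvLoopA (c :: t) (inicio+1) (fim+1) r = pvLoopA t inicio fim r := by
  fun_induction pvLoopA t inicio fim r with
  | case1 inicio fim r h ih =>
      rw [pvLoopA]
      simp only [List.length_cons]
      rw [dif_pos (by omega)]
      have hw : pvWinA (c :: t) (inicio+1) = pvWinA t inicio := by
        simp [pvWinA]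
      rw [hw]; exact ih
  | case2 inicio fim r h =>
      rw [pvLoopA]
      simp only [List.length_cons]
      rw [dif_neg (by omega)]

theorem pvLoopA_eq_scan4 (t : List Char) (r : Int) :
    pvLoopA t 0 4 r = if pvScan4 t then 1 else r := by
  induction t generalizing r with
  | nil => rw [pvLoopA]; simp [pvScan4]
  | cons a rest ih =>
      match rest with
      | [] => rw [pvLoopA]; simp [pvScan4]
      | [_] => rw [pvLoopA]; simp [pvScan4]
      | [_, _] => rw [pvLoopA]; simp [pvScan4]
      | b :: c :: d :: rest' =>
          rw [pvLoopA]
          rw [dif_pos (by simp)]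
          rw [pvLoopA_cons (b :: c :: d :: rest') a 0 4]
          rw [ih]
          have hw : pvWinA (a :: b :: c :: d :: rest') 0 =
              pvWin? (a :: b :: c :: d :: rest') := by
            simp only [pvWin?]
            rw [show ("IVLAPM".toList) = ['I','V','L','A','P','M'] from rfl,
               show ("AMSL".toList) = ['A','M','S','L'] from rfl]
            simp [pvWinA, List.getD, beq_eq_decide, Bool.or_assoc]
          rw [hw]
          show _ = if pvScan4 (a :: b :: c :: d :: rest') then (1:Int) else r
          rw [pvScan4]
          cases hh : pvWin? (a :: b :: c :: d :: rest') <;>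
            cases ht : pvScan4 (b :: c :: d :: rest') <;> simp

-- ===== B-side: the automaton computes pvScan4 =====
-- canonical history witnessing automaton state st
def pvPref : Nat → List Char
  | 1 => ['C']
  | 2 => ['C', 'I']
  | 3 => ['C', 'I', 'I']
  | _ => []

theorem pvIVLAPM_ne_C (ch : Char) (h : "IVLAPM".toList.contains ch = true) :
    (ch == 'C') = false := by
  rw [show ("IVLAPM".toList) = ['I','V','L','A','P','M'] from rfl] at h
  simp only [List.contains_eq_mem, List.mem_cons, List.not_mem_nil, or_false,
    decide_eq_true_eq] at h
  rcases h with rfl | rfl | rfl | rfl | rfl | rfl <;> decide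

theorem pvAuto_eq_scan4 (t : List Char) (st : Nat) (hst : st ≤ 3) :
    pvAuto t st = if pvScan4 (pvPref st ++ t) then 1 else 0 := by
  induction t generalizing st with
  | nil =>
      interval_cases st <;> simp [pvAuto, pvPref, pvScan4]
  | cons ch rest ih =>
      have ih0 := ih 0 (by norm_num)
      have ih1 := ih 1 (by norm_num)
      have ih2 := ih 2 (by norm_num)
      have ih3 := ih 3 (by norm_num)
      simp only [pvPref, List.cons_append, List.nil_append] at ih0 ih1 ih2 ih3
      interval_cases st
      · -- st = 0
        show pvAuto rest (if ch == 'C' then 1 else 0) =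
          if pvScan4 (ch :: rest) = true then 1 else 0
        by_cases hC : (ch == 'C') = true
        · rw [if_pos hC, ih1, eq_of_beq hC]; rfl
        · rw [if_neg hC, ih0, pvScan4_cons,
            pvWin?_not_C ch rest (by simpa using hC), Bool.false_or]; rfl
      · -- st = 1
        show pvAuto rest (if "IVLAPM".toList.contains ch then 2
                          else if ch == 'C' then 1 else 0) =
          if pvScan4 ('C' :: ch :: rest) = true then 1 else 0
        by_cases hB : "IVLAPM".toList.contains ch = true
        · rw [if_pos hB, ih2]
          have hnc := pvIVLAPM_ne_C ch hB
          have : pvScan4 ('C' :: ch :: rest) = pvScan4 ('C' :: 'I' :: rest) := by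
            simp only [pvScan4_cons]
            rw [pvWin?_snd_congr _ _ _ hB, pvWin?_not_C ch rest hnc,
              pvWin?_not_C 'I' rest (by decide)]
          rw [this]; rfl
        · rw [if_neg hB]
          have hw1 : pvWin? ('C' :: ch :: rest) = false :=
            pvWin?_snd _ _ _ (by simpa using hB)
          by_cases hC : (ch == 'C') = true
          · rw [if_pos hC, ih1]
            have : pvScan4 ('C' :: ch :: rest) = pvScan4 ('C' :: rest) := by
              rw [pvScan4_cons, hw1, Bool.false_or, eq_of_beq hC]
            rw [this]; rfl
          · rw [if_neg hC, ih0]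
            have : pvScan4 ('C' :: ch :: rest) = pvScan4 rest := by
              rw [pvScan4_cons, hw1, Bool.false_or, pvScan4_cons,
                pvWin?_not_C ch rest (by simpa using hC), Bool.false_or]
            rw [this]; rfl
      · -- st = 2
        show pvAuto rest (if "IVLAPM".toList.contains ch then 3
                          else if ch == 'C' then 1 else 0) =
          if pvScan4 ('C' :: 'I' :: ch :: rest) = true then 1 else 0
        by_cases hB : "IVLAPM".toList.contains ch = true
        · rw [if_pos hB, ih3]
          have hnc := pvIVLAPM_ne_C ch hB
          have : pvScan4 ('C' :: 'I' :: ch :: rest) = pvScan4 ('C' :: 'I' :: 'I' :: rest) := by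
            simp only [pvScan4_cons]
            rw [pvWin?_thd_congr _ _ _ _ hB, pvWin?_not_C ch rest hnc,
              pvWin?_not_C 'I' (ch :: rest) (by decide), pvWin?_not_C 'I' ('I' :: rest) (by decide),
              pvWin?_not_C 'I' rest (by decide)]
          rw [this]; rfl
        · rw [if_neg hB]
          have hw1 : pvWin? ('C' :: 'I' :: ch :: rest) = false :=
            pvWin?_thd _ _ _ _ (by simpa using hB)
          have hw2 : pvWin? ('I' :: ch :: rest) = false := pvWin?_not_C _ _ (by decide)
          by_cases hC : (ch == 'C') = true
          · rw [if_pos hC, ih1]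
            have : pvScan4 ('C' :: 'I' :: ch :: rest) = pvScan4 ('C' :: rest) := by
              rw [pvScan4_cons, hw1, Bool.false_or, pvScan4_cons, hw2, Bool.false_or,
                eq_of_beq hC]
            rw [this]; rfl
          · rw [if_neg hC, ih0]
            have : pvScan4 ('C' :: 'I' :: ch :: rest) = pvScan4 rest := by
              rw [pvScan4_cons, hw1, Bool.false_or, pvScan4_cons, hw2, Bool.false_or,
                pvScan4_cons, pvWin?_not_C ch rest (by simpa using hC), Bool.false_or]
            rw [this]; rfl
      · -- st = 3
        show (if "AMSL".toList.contains ch then (1:Int)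
              else pvAuto rest (if ch == 'C' then 1 else 0)) =
          if pvScan4 ('C' :: 'I' :: 'I' :: ch :: rest) = true then 1 else 0
        by_cases hD : "AMSL".toList.contains ch = true
        · rw [if_pos hD]
          have : pvScan4 ('C' :: 'I' :: 'I' :: ch :: rest) = true := by
            rw [pvScan4_cons]
            simp only [pvWin?]
            rw [hD]
            simp
          rw [this, if_pos rfl]
        · rw [if_neg hD]
          have hw1 : pvWin? ('C' :: 'I' :: 'I' :: ch :: rest) = false := by
            simp only [pvWin?]
            rw [show "AMSL".toList.contains ch = false from by simpa using hD]
            simp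
          have hw2 : pvWin? ('I' :: 'I' :: ch :: rest) = false := pvWin?_not_C _ _ (by decide)
          have hw3 : pvWin? ('I' :: ch :: rest) = false := pvWin?_not_C _ _ (by decide)
          by_cases hC : (ch == 'C') = true
          · rw [if_pos hC, ih1]
            have : pvScan4 ('C' :: 'I' :: 'I' :: ch :: rest) = pvScan4 ('C' :: rest) := by
              rw [pvScan4_cons, hw1, Bool.false_or, pvScan4_cons, hw2, Bool.false_or,
                pvScan4_cons, hw3, Bool.false_or, eq_of_beq hC]
            rw [this]; rfl
          · rw [if_neg hC, ih0]
            have : pvScan4 ('C' :: 'I' :: 'I' :: ch :: rest) = pvScan4 rest := by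
              rw [pvScan4_cons, hw1, Bool.false_or, pvScan4_cons, hw2, Bool.false_or,
                pvScan4_cons, hw3, Bool.false_or, pvScan4_cons,
                pvWin?_not_C ch rest (by simpa using hC), Bool.false_or]
            rw [this]; rfl

-- ===== VERDICT (by name: the statement is the Claim_ definition above) =====
theorem prenilacao_spec : Claim_equal_prenilacao := by
  intro s _
  unfold Spec_prenilacao prenilacao prenilacao_alt
  rw [pvLoopA_eq_scan4, pvAuto_eq_scan4 _ 0 (by norm_num)]
  rfl
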